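-- pv_equiv track=rewrite | github.com/Soft/advent-of-code-2020 | aoc/days/day20.py | multiline_match_count
-- ===== SOURCE A (Python) =====
-- def sliding_windows(n, lst):
--     for i in range(0, len(lst) - n + 1):
--         yield lst[i : i + n]
--
-- def fuzzy_match(pattern, string):
--     assert len(pattern) == len(string)
--     for p, c in zip(pattern, string):
--         if p == "#":
--             if c != "#":
--                 return False
--     return True
--
-- def multiline_match_count(pattern, lines):
--     matches = 0
--     if len(lines) < len(pattern):
--         return matches
--     first, *others = pattern
--     pattern_len = len(first)
--     for x, piece in enumerate(sliding_windows(pattern_len, lines[0])):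
--         if fuzzy_match(first, piece):
--             for pattern, line in zip(others, lines[1:]):
--                 if not fuzzy_match(pattern, line[x : x + pattern_len]):
--                     break
--             else:
--                 matches += 1
--     return matches
-- ===== SOURCE B (Python) =====
-- def multiline_match_count(pattern, lines):
--     ph = len(pattern)
--     if ph == 0 or len(lines) < ph:
--         return 0
--     w = len(pattern[0])
--     W = len(lines[0])
--     if W < w:
--         return 0
--     # acc has bit x set iff offset x still matches everything checked so far
--     acc = (1 << (W - w + 1)) - 1
--     for row, line in zip(pattern, lines):
--         if "#" not in row:
--             continue
--         lm = int("".join("1" if ch == "#" else "0" for ch in reversed(line)) or "0", 2)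
--         for c, ch in enumerate(row):
--             if ch == "#":
--                 acc &= lm >> c
--     return bin(acc).count("1")
-- ===== Notes on version B (the rewrite author's own statement) =====
-- stated objective: faster
-- what changed: B is a bitset algorithm: it parses each needed line once into an integer bit mask, starts from an all-ones mask of candidate offsets and performs one big-int shift-and-AND per '#' cell of the pattern to clear the offsets that cell rules out (rows without '#' cells are skipped outright), then returns the popcount; there is no per-offset loop, no window slicing and no per-character comparison.
-- outside the precondition, e.g. on multiline_match_count(['#', '#'], ['#.', '#']): A returns 1, B returns 1
import Mathlib
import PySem

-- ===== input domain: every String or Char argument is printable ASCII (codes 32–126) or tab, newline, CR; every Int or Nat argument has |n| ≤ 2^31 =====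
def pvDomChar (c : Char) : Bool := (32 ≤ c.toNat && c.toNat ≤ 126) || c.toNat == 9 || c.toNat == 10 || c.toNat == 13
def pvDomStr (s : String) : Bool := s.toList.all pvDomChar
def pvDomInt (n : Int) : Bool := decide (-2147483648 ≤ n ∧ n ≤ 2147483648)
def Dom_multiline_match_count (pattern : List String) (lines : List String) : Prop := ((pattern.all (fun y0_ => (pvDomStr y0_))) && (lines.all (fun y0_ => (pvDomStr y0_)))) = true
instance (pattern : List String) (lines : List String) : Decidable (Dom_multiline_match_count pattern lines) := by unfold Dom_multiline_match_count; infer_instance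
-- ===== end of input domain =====

-- B replaces A's per-offset character scans by a bitset algorithm: each line becomes a bit
-- mask, one big-int AND per '#' pattern cell narrows the set of matching offsets, and the
-- answer is a popcount (measured faster).


-- ===== PORT A =====
-- sliding_windows(n, lst): list of the generator's yields
def pvWindows (n : Int) (lst : List Char) : List (List Char) :=
  (PySem.List.pyRange 0 ((lst.length : Int) - n + 1) 1).map
    (fun i => PySem.List.slice lst (some i) (some (i + n)))

-- fuzzy_match(pattern, string): the loop over zip(pattern, string); the assert
-- (len equality) is excluded by Pre_, so it is not modelled
def pvFuzzy : List Char → List Char → Bool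
  | [], _ => true
  | _ :: _, [] => true
  | p :: ps, c :: cs =>
      if p = '#' then (if c ≠ '#' then false else pvFuzzy ps cs) else pvFuzzy ps cs

-- the inner 'for pattern, line in zip(others, lines[1:]) … else' loop: true = no break
def pvInner (w x : Int) : List (List Char) → List (List Char) → Bool
  | [], _ => true
  | _ :: _, [] => true
  | p :: ps, l :: ls =>
      if ¬ pvFuzzy p (PySem.List.slice l (some x) (some (x + w))) then false
      else pvInner w x ps ls

def multiline_match_count (pattern : List String) (lines : List String) : Int :=
  if (lines.length : Int) < pattern.length then 0
  else
    match pattern, lines with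
    | [], _ => 0          -- Python raises ValueError unpacking here; excluded by Pre_
    | _ :: _, [] => 0     -- unreachable: lines.length ≥ pattern.length ≥ 1
    | first :: others, l0 :: rest =>
      let w : Int := (first.toList.length : Int)
      ((pvWindows w l0.toList).zipIdx.foldl
        (fun acc pieceX =>
          if pvFuzzy first.toList pieceX.1 then
            if pvInner w (pieceX.2 : Int) (others.map String.toList) (rest.map String.toList)
            then acc + 1 else acc
          else acc) (0 : Int))

-- ===== PORT B =====
-- lm = int("".join("1" if ch == "#" else "0" for ch in reversed(line)) or "0", 2):
-- hand-ported binary-string parse (exact: most-significant digit first over reversed(line)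
-- is the left fold acc*2+digit over reversed(line); bit i of the result marks line[i]=='#')
def pvLineMask (line : List Char) : Nat :=
  line.reverse.foldl (fun acc ch => 2 * acc + (if ch = '#' then 1 else 0)) 0

-- the inner 'for c, ch in enumerate(row): if ch == "#": acc &= lm >> c' loop
def pvInnerAnd (lm : Nat) (row : List Char) (a : Nat) : Nat :=
  row.zipIdx.foldl (fun a cch => if cch.1 = '#' then a &&& (lm >>> cch.2) else a) a

def multiline_match_count_alt (pattern : List String) (lines : List String) : Int :=
  if pattern.length = 0 || lines.length < pattern.length then 0
  else
    let w := (pattern.headD "").toList.length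
    let W := (lines.headD "").toList.length
    if W < w then 0
    else
      let acc := (pattern.zip lines).foldl
        (fun a rl =>
          if rl.1.toList.contains '#' then pvInnerAnd (pvLineMask rl.2.toList) rl.1.toList a
          else a)
        (2 ^ (W - w + 1) - 1)
      -- bin(acc).count("1"): the number of 1 digits of acc in base 2
      (((Nat.digits 2 acc).count 1 : Nat) : Int)

-- ===== PRECONDITION & SPEC =====
-- Pre_ excludes the inputs where A's unpacking or fuzzy_match asserts can raise: empty pattern,
-- and (when at least one window exists and the pattern fits vertically) pattern rows of unequal
-- length or a line among lines[1:len(pattern)] shorter than lines[0]; on some of these A happens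
-- to return because a break is hit before the failing assert, so Pre_ is slightly narrower than
-- the raising set.
def Pre_multiline_match_count (pattern : List String) (lines : List String) : Prop :=
  pattern ≠ [] ∧
  (((lines.length : Int) < pattern.length) ∨
   ((lines.headD "").toList.length < (pattern.headD "").toList.length) ∨
   ((∀ p ∈ pattern, p.toList.length = (pattern.headD "").toList.length) ∧
    ∀ l ∈ (lines.drop 1).take (pattern.length - 1),
      (lines.headD "").toList.length ≤ l.toList.length))
instance (pattern : List String) (lines : List String) : Decidable (Pre_multiline_match_count pattern lines) := by unfold Pre_multiline_match_count; infer_instance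

def pvWitness_multiline_match_count : List String × List String :=
  (["#.", ".#"], ["#.#", ".##"])

def Spec_multiline_match_count (pattern : List String) (lines : List String) (out : Int) : Prop := out = multiline_match_count_alt pattern lines
instance (pattern : List String) (lines : List String) (out : Int) : Decidable (Spec_multiline_match_count pattern lines out) := by unfold Spec_multiline_match_count; infer_instance

-- ===== CLAIM (what is proved, stated in full; the proofs are below) =====
def Claim_equal_multiline_match_count : Prop := ∀ (pattern : List String) (lines : List String), Dom_multiline_match_count pattern lines → Pre_multiline_match_count pattern lines → Spec_multiline_match_count pattern lines (multiline_match_count pattern lines)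

-- ===== LEMMAS AND PROOFS =====

-- helper for the proofs: row r of the pattern matches the line l at horizontal offset j
def pvRowOK (l : List Char) : List Char → Nat → Bool
  | [], _ => true
  | ch :: t, j => (decide (ch ≠ '#') || decide (l.getD j ' ' = '#')) && pvRowOK l t (j + 1)

-- fuzzy_match on a full-length slice is the row predicate
lemma pv_fuzzy_eq (l : List Char) : ∀ (p : List Char) (j : Nat), j + p.length ≤ l.length →
    pvFuzzy p ((l.drop j).take p.length) = pvRowOK l p j := by
  intro p
  induction p with
  | nil => intro j _; simp [pvFuzzy, pvRowOK]
  | cons ch t ih =>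
    intro j hj
    have hjl : j < l.length := by simp at hj; omega
    rw [List.drop_eq_getElem_cons hjl]
    have ht : (j + 1) + t.length ≤ l.length := by simp at hj ⊢; omega
    simp only [List.length_cons, List.take_succ_cons, pvFuzzy, pvRowOK,
      List.getD_eq_getElem l ' ' hjl, ih (j + 1) ht]
    by_cases hch : ch = '#' <;> by_cases hc : l[j] = '#' <;> simp [hch, hc]

lemma pv_fuzzy_slice (l p : List Char) (j : Nat) (hj : j + p.length ≤ l.length) :
    pvFuzzy p (PySem.List.slice l (some (j : Int)) (some ((j : Int) + (p.length : Int))))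
      = pvRowOK l p j := by
  rw [PySem.List.slice_natCast_add, pv_fuzzy_eq l p j hj]

-- the inner zip loop of A is an `all` of row predicates over the zipped rows/lines
lemma pv_inner_eq : ∀ (os ls : List (List Char)) (x w : Nat),
    (∀ o ∈ os, o.length = w) → (∀ l ∈ ls.take os.length, x + w ≤ l.length) →
    pvInner (w : Int) (x : Int) os ls = (os.zip ls).all (fun pl => pvRowOK pl.2 pl.1 x) := by
  intro os
  induction os with
  | nil => intro ls x w _ _; simp [pvInner]
  | cons o ot ih =>
    intro ls x w hw hl
    cases ls with
    | nil => simp [pvInner]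
    | cons l lt =>
      have hol : o.length = w := hw o (by simp)
      have hxl : x + o.length ≤ l.length := by
        rw [hol]; exact hl l (by simp)
      have hslice : ((x : Int) + (w : Int)) = ((x : Int) + (o.length : Int)) := by
        rw [hol]
      simp only [pvInner, hslice, pv_fuzzy_slice l o x hxl, List.zip_cons_cons, List.all_cons]
      rcases h : pvRowOK l o x with _ | _
      · simp
      · simp only [ite_false, not_true_eq_false, Bool.true_and]
        exact ih lt x w (fun o' ho' => hw o' (by simp [ho']))
          (fun l' hl' => hl l' (by simpa using Or.inr hl'))

-- zipIdx of a range is explicit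
lemma pv_zipIdx_range : ∀ (n s : Nat),
    (List.range n).zipIdx s = (List.range n).map (fun i => (i, s + i)) := by
  intro n
  induction n with
  | zero => intro s; simp
  | succ m ih =>
    intro s
    rw [List.range_succ, List.zipIdx_append, ih s, List.map_append]
    simp

-- A's counting loop as a countP over range
lemma pv_A_count (first : String) (others : List String) (l0 : String) (rest : List String)
    (hlt : ¬ ((l0 :: rest).length : Int) < ((first :: others).length : Int)) :
    multiline_match_count (first :: others) (l0 :: rest)
      = ((List.range (((l0.toList.length : Int) - (first.toList.length : Int) + 1)).toNat).countP
          (fun (k : Nat) => pvFuzzy first.toList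
              (PySem.List.slice l0.toList (some ((k : Nat) : Int))
                (some (((k : Nat) : Int) + (first.toList.length : Int))))
            && pvInner (first.toList.length : Int) ((k : Nat) : Int)
                (others.map String.toList) (rest.map String.toList)) : Int) := by
  have hfun : (fun (acc : Int) (pieceX : List Char × Nat) =>
        if pvFuzzy first.toList pieceX.1 then
          if pvInner (first.toList.length : Int) (pieceX.2 : Int)
              (others.map String.toList) (rest.map String.toList)
          then acc + 1 else acc
        else acc)
      = (fun (acc : Int) (pieceX : List Char × Nat) =>
        if pvFuzzy first.toList pieceX.1
            && pvInner (first.toList.length : Int) (pieceX.2 : Int)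
                (others.map String.toList) (rest.map String.toList)
          then acc + 1 else acc) := by
    funext acc p
    by_cases h1 : pvFuzzy first.toList p.1 <;>
      by_cases h2 : pvInner (first.toList.length : Int) (p.2 : Int)
        (others.map String.toList) (rest.map String.toList) <;> simp [h1]
  simp only [multiline_match_count, if_neg hlt, hfun, PySem.List.foldl_count_if, zero_add]
  congr 1
  unfold pvWindows
  rw [PySem.List.pyRange_one, List.map_map, List.zipIdx_map, pv_zipIdx_range, List.map_map,
    List.countP_map]
  simp only [Int.sub_zero]
  apply List.countP_congr
  intro k _
  simp [Function.comp]

-- bit i of a line mask says line[i] == '#'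
lemma pv_mask_testBit (l : List Char) : ∀ j,
    (pvLineMask l).testBit j = decide (l.getD j ' ' = '#') := by
  unfold pvLineMask
  rw [List.foldl_reverse]
  induction l with
  | nil => intro j; simp [Nat.zero_testBit]
  | cons c t ih =>
    intro j
    have hd2 : (2 * List.foldr (fun x y => 2 * y + if x = '#' then 1 else 0) 0 t
        + (if c = '#' then 1 else 0)) / 2
        = List.foldr (fun x y => 2 * y + if x = '#' then 1 else 0) 0 t := by
      by_cases h : c = '#'
      · simp [h]; omega
      · simp [h]
    cases j with
    | zero =>
      simp only [List.foldr_cons, Nat.testBit_zero, List.getD_cons_zero]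
      by_cases h : c = '#' <;> simp [h]
    | succ m =>
      simp only [List.foldr_cons, Nat.testBit_succ, hd2, List.getD_cons_succ]
      exact ih m

-- bit k after the inner AND loop: bit k before it, and the row matches at offset k
lemma pv_innerAnd_bit (l : List Char) : ∀ (row : List Char) (s a k : Nat),
    ((List.zipIdx row s).foldl
        (fun a cch => if cch.1 = '#' then a &&& (pvLineMask l >>> cch.2) else a) a).testBit k
      = (a.testBit k && pvRowOK l row (k + s)) := by
  intro row
  induction row with
  | nil => intro s a k; simp [pvRowOK]
  | cons c t ih =>
    intro s a k
    simp only [List.zipIdx_cons, List.foldl_cons, ih (s + 1), pvRowOK]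
    have hks : k + s + 1 = k + (s + 1) := by omega
    by_cases h : c = '#'
    · simp only [h, if_true]
      rw [Nat.testBit_and, Nat.testBit_shiftRight, pv_mask_testBit l (s + k), Nat.add_comm s k,
        ← hks]
      simp [Bool.and_assoc]
    · simp [h, hks]

-- the inner loop only clears bits
lemma pv_innerAnd_le (lm : Nat) (row : List Char) : ∀ (s a : Nat),
    (List.zipIdx row s).foldl
        (fun a cch => if cch.1 = '#' then a &&& (lm >>> cch.2) else a) a ≤ a := by
  induction row with
  | nil => intro s a; simp
  | cons c t ih =>
    intro s a
    simp only [List.zipIdx_cons, List.foldl_cons]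
    refine le_trans (ih (s + 1) _) ?_
    by_cases h : c = '#' <;> simp [h, Nat.and_le_left]

-- a row without '#' cells matches everywhere
lemma pv_rowOK_no_hash (l : List Char) : ∀ (row : List Char) (k : Nat),
    row.contains '#' = false → pvRowOK l row k = true := by
  intro row
  induction row with
  | nil => intro k _; simp [pvRowOK]
  | cons c t ih =>
    intro k h
    simp only [List.contains_cons, Bool.or_eq_false_iff, beq_eq_false_iff_ne] at h
    rw [pvRowOK, ih (k + 1) (by simpa using h.2)]
    simp [Ne.symm h.1]

-- bit k after the whole fold over the zipped (pattern row, line) pairs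
lemma pv_outer_bit : ∀ (prs : List (String × String)) (a k : Nat),
    ((prs.foldl (fun a rl =>
        if rl.1.toList.contains '#' then pvInnerAnd (pvLineMask rl.2.toList) rl.1.toList a
        else a) a).testBit k)
      = (a.testBit k && prs.all (fun rl => pvRowOK rl.2.toList rl.1.toList k)) := by
  intro prs
  induction prs with
  | nil => intro a k; simp
  | cons rl t ih =>
    intro a k
    simp only [List.foldl_cons, ih, List.all_cons]
    by_cases h : rl.1.toList.contains '#'
    · rw [if_pos h]
      unfold pvInnerAnd
      rw [pv_innerAnd_bit, Nat.add_zero, Bool.and_assoc]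
    · rw [if_neg h, pv_rowOK_no_hash rl.2.toList rl.1.toList k (by simpa using h)]
      simp

lemma pv_outer_le : ∀ (prs : List (String × String)) (a : Nat),
    prs.foldl (fun a rl =>
        if rl.1.toList.contains '#' then pvInnerAnd (pvLineMask rl.2.toList) rl.1.toList a
        else a) a ≤ a := by
  intro prs
  induction prs with
  | nil => intro a; simp
  | cons rl t ih =>
    intro a
    refine le_trans (ih _) ?_
    simp only []
    by_cases h : rl.1.toList.contains '#'
    · rw [if_pos h]; exact pv_innerAnd_le _ _ 0 a
    · rw [if_neg h]

-- the number of 1 digits in base 2 is the number of set bits below any bound 2^m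
lemma pv_digits_count (m : Nat) : ∀ n < 2 ^ m,
    (Nat.digits 2 n).count 1 = (List.range m).countP (fun k => n.testBit k) := by
  induction m with
  | zero =>
    intro n hn
    interval_cases n
    simp
  | succ p ih =>
    intro n hn
    rcases Nat.eq_zero_or_pos n with h0 | h0
    · subst h0; simp [Nat.zero_testBit]
    · rw [Nat.digits_def' (by norm_num) h0, List.range_succ_eq_map]
      simp only [List.count_cons, List.countP_cons, List.countP_map]
      have hh : (n / 2) < 2 ^ p := by
        have : n < 2 * 2 ^ p := by rw [← pow_succ']; exact hn
        omega
      have hrec : ((List.range p).countP ((fun k => n.testBit k) ∘ Nat.succ))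
          = (Nat.digits 2 (n / 2)).count 1 := by
        rw [ih (n / 2) hh]
        apply List.countP_congr
        intro k _
        simp [Function.comp, Nat.testBit_succ]
      rw [hrec, List.count]
      have h0bit : (n.testBit 0) = decide (n % 2 = 1) := Nat.testBit_zero n
      rw [h0bit]
      have hmod : n % 2 = 0 ∨ n % 2 = 1 := by omega
      rcases hmod with h | h <;> simp [h]

-- ===== VERDICT (by name: the statement is the Claim_ definition above) =====
theorem multiline_match_count_spec : Claim_equal_multiline_match_count := by
  intro pattern lines _ hpre
  unfold Spec_multiline_match_count
  obtain ⟨hne, hdisj⟩ := hpre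
  obtain ⟨first, others, rfl⟩ := List.exists_cons_of_ne_nil hne
  by_cases hlt : ((lines.length : Int) < ((first :: others).length : Int))
  · have h2 : lines.length < (first :: others).length := by exact_mod_cast hlt
    have h3 : lines.length ≤ others.length := by simp at h2; omega
    simp [multiline_match_count, multiline_match_count_alt, h3]
  · cases lines with
    | nil => simp at hlt
    | cons l0 rest =>
      have hlen : (first :: others).length ≤ (l0 :: rest).length := by
        have h := not_lt.mp hlt
        exact_mod_cast h
      rw [pv_A_count first others l0 rest hlt]
      set w := first.toList.length with hw
      set W := l0.toList.length with hW
      by_cases hWw : W < w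
      · -- no window fits: both sides count over an empty range
        have hA : (((W : Int) - (w : Int) + 1)).toNat = 0 := by omega
        have hB : multiline_match_count_alt (first :: others) (l0 :: rest) = 0 := by
          simp only [multiline_match_count_alt]
          rw [if_neg (by simpa using hlen)]
          simp only [List.headD_cons, ← hw, ← hW]
          rw [if_pos hWw]
        rw [hA, hB]
        simp
      · -- main case: W ≥ w
        have hwW : w ≤ W := not_lt.mp hWw
        have hA : (((W : Int) - (w : Int) + 1)).toNat = W - w + 1 := by omega
        -- unfold B
        have hB : multiline_match_count_alt (first :: others) (l0 :: rest)
            = (((Nat.digits 2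
                (((first :: others).zip (l0 :: rest)).foldl
                  (fun a rl =>
                    if rl.1.toList.contains '#' then
                      pvInnerAnd (pvLineMask rl.2.toList) rl.1.toList a
                    else a)
                  (2 ^ (W - w + 1) - 1))).count 1 : Nat) : Int) := by
          simp only [multiline_match_count_alt]
          rw [if_neg (by simpa using hlen)]
          simp only [List.headD_cons, ← hw, ← hW]
          rw [if_neg hWw]
        rw [hA, hB]
        set acc := ((first :: others).zip (l0 :: rest)).foldl
          (fun a rl =>
            if rl.1.toList.contains '#' then
              pvInnerAnd (pvLineMask rl.2.toList) rl.1.toList a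
            else a)
          (2 ^ (W - w + 1) - 1) with hacc
        have haccle : acc < 2 ^ (W - w + 1) := by
          have h1 : acc ≤ 2 ^ (W - w + 1) - 1 := pv_outer_le _ _
          have h2 : 0 < 2 ^ (W - w + 1) := pow_pos (by norm_num : (0:ℕ) < 2) _
          omega
        rw [pv_digits_count (W - w + 1) acc haccle]
        congr 1
        apply List.countP_congr
        intro k hk
        have hkr : k < W - w + 1 := List.mem_range.mp hk
        have hbit : acc.testBit k
            = ((2 ^ (W - w + 1) - 1).testBit k
              && ((first :: others).zip (l0 :: rest)).all
                  (fun rl => pvRowOK rl.2.toList rl.1.toList k)) :=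
          pv_outer_bit _ _ k
        rw [hbit, Nat.testBit_two_pow_sub_one, decide_eq_true hkr, Bool.true_and]
        -- now relate A's per-k predicate with the all over the zip
        have hwk : k + w ≤ W := by omega
        rcases hdisj with h | h | h
        · exact absurd h hlt
        · simp only [List.headD_cons] at h
          omega
        · obtain ⟨hrows, hlenl⟩ := h
          have hlen' : ∀ l ∈ rest.take others.length, W ≤ l.toList.length := by
            intro l hl
            simpa using hlenl l (by simpa using hl)
          rw [pv_fuzzy_slice l0.toList first.toList k (by rw [← hw, ← hW]; omega)]
          have hO : ∀ o ∈ others.map String.toList, o.length = w := by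
            intro o ho
            obtain ⟨p, hp, rfl⟩ := List.mem_map.mp ho
            simpa using hrows p (by simp [hp])
          have hT : ∀ l ∈ (rest.map String.toList).take (others.map String.toList).length,
              k + w ≤ l.length := by
            intro l hl
            rw [List.length_map, ← List.map_take] at hl
            obtain ⟨l', hl', rfl⟩ := List.mem_map.mp hl
            exact le_trans hwk (hlen' l' hl')
          rw [pv_inner_eq (others.map String.toList) (rest.map String.toList) k w hO hT]
          simp only [List.zip_cons_cons, List.all_cons]
          rw [List.zip_map, List.all_map]
          rfl
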